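-- pv_equiv track=rewrite | github.com/vitala11111112/dz | DZHP1.py | tusk_1
-- ===== SOURCE A (Python) =====
-- def tusk_1(main_list):
--     second_list = []
--     izgoii = []
--     for i in range(len(main_list)):
--         if main_list[i] not in second_list:
--             second_list.append(main_list[i])
--         else:
--             izgoi = second_list.index(main_list[i])
--             second_list.pop(izgoi)
--             izgoii.append(main_list)
--     return second_list
-- ===== SOURCE B (Python) =====
-- def tusk_1(main_list):
--     # Two staged passes instead of toggling: an element survives the pair
--     # cancellation iff it occurs an odd number of times, and it ends up at the
--     # position of its last occurrence.  So count occurrences once, then scan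
--     # from the right keeping the first sighting of each odd-count element,
--     # and reverse.
--     counts = {}
--     for x in main_list:
--         counts[x] = counts.get(x, 0) + 1
--     out = []
--     seen = set()
--     for x in reversed(main_list):
--         if x not in seen:
--             seen.add(x)
--             if counts[x] % 2 == 1:
--                 out.append(x)
--     out.reverse()
--     return out
-- ===== Notes on version B (the rewrite author's own statement) =====
-- stated objective: faster
-- what changed: Replaces A's single toggling pass (membership/index/pop on a growing list per element, O(n^2)) by a count-then-filter algorithm: one pass builds an occurrence counter, a second right-to-left pass emits the first sighting of each odd-count element, then the result is reversed; correct because an element survives pair cancellation iff its count is odd, and it lands at its last occurrence.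
import Mathlib
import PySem

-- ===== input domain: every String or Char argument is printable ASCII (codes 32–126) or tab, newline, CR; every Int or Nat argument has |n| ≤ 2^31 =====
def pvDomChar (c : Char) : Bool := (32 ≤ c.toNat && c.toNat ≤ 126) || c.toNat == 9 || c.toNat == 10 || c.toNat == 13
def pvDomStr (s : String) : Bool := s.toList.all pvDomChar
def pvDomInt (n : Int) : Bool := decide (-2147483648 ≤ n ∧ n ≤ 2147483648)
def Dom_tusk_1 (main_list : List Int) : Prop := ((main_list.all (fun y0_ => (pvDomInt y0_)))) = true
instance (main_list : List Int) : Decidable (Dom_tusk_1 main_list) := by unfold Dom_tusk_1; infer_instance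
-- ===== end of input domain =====

-- B replaces A's single toggling pass (list membership/index/pop per element) by two staged
-- passes: count occurrences once, then scan from the right emitting the first sighting of each
-- odd-count element, and reverse.


-- ===== PORT A =====
-- state: (second_list, izgoii); izgoii is built exactly as in A but never read back
def tusk_1 (main_list : List Int) : List Int :=
  (main_list.foldl
    (fun (st : List Int × List (List Int)) x =>
      if x ∉ st.1 then
        (st.1 ++ [x], st.2)
      else
        match PySem.List.index? st.1 x with
        | some izgoi =>
            (((PySem.List.pop? st.1 (izgoi : Int)).map Prod.snd).getD st.1, st.2 ++ [main_list])
        | none => (st.1, st.2)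
    ) ([], [])).1

-- ===== PORT B =====
-- pass 1: counts = {} ; for x in main_list: counts[x] = counts.get(x, 0) + 1
-- pass 2: for x in reversed(main_list): if x not in seen: seen.add(x); if counts[x] % 2 == 1: out.append(x)
-- then out.reverse()
def tusk_1_alt (main_list : List Int) : List Int :=
  let counts : PySem.Dict Int Int :=
    main_list.foldl (fun d x => d.insert x (d.getD x 0 + 1)) PySem.Dict.empty
  let st := main_list.reverse.foldl
    (fun (st : PySem.Set Int × List Int) x =>
      if PySem.Set.contains st.1 x then st
      else (PySem.Set.add st.1 x,
            if PySem.Int.mod (counts.getD x 0) 2 == 1 then st.2 ++ [x] else st.2))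
    (PySem.Set.empty, [])
  st.2.reverse

-- ===== PRECONDITION & SPEC =====
def Spec_tusk_1 (main_list : List Int) (out : List Int) : Prop := out = tusk_1_alt main_list
instance (main_list : List Int) (out : List Int) : Decidable (Spec_tusk_1 main_list out) := by unfold Spec_tusk_1; infer_instance

-- ===== CLAIM (what is proved, stated in full; the proofs are below) =====
def Claim_equal_tusk_1 : Prop := ∀ (main_list : List Int), Dom_tusk_1 main_list → Spec_tusk_1 main_list (tusk_1 main_list)

-- ===== LEMMAS AND PROOFS =====

-- proof-side model of B's second pass: dedup-from-the-left keeping elements satisfying pred,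
-- with the 'seen' set represented as a Boolean predicate
def mdd (pred : Int → Bool) (seen : Int → Bool) : List Int → List Int
  | [] => []
  | x :: t =>
    if seen x then mdd pred seen t
    else if pred x then x :: mdd pred (fun y => seen y || (y == x)) t
    else mdd pred (fun y => seen y || (y == x)) t

-- mdd only looks at `seen` pointwise
theorem mdd_seen_congr (pred : Int → Bool) (seen seen' : Int → Bool)
    (h : ∀ y, seen y = seen' y) (l : List Int) :
    mdd pred seen l = mdd pred seen' l := by
  have : seen = seen' := funext h
  rw [this]

-- mdd only looks at `pred` on unseen elements
theorem mdd_pred_congr (pred pred' : Int → Bool) (l : List Int) :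
    ∀ seen : Int → Bool, (∀ y, seen y = false → pred y = pred' y) →
    mdd pred seen l = mdd pred' seen l := by
  induction l with
  | nil => intro seen _; rfl
  | cons x t ih =>
    intro seen h
    by_cases hx : seen x = true
    · simp [mdd, hx, ih seen h]
    · have hx' : seen x = false := by simpa using hx
      have h' : ∀ y, (seen y || (y == x)) = false → pred y = pred' y := by
        intro y hy
        exact h y (by simpa using (Bool.or_eq_false_iff.mp hy).1)
      simp [mdd, hx', h x hx', ih _ h']

-- marking x as seen from the start = filtering x out of the result
theorem mdd_add_filter (pred : Int → Bool) (x : Int) (l : List Int) :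
    ∀ seen : Int → Bool,
    mdd pred (fun y => seen y || (y == x)) l = (mdd pred seen l).filter (fun y => !(y == x)) := by
  induction l with
  | nil => intro seen; rfl
  | cons z t ih =>
    intro seen
    by_cases hz : seen z = true
    · have hzL : (seen z || (z == x)) = true := by simp [hz]
      simp only [mdd, hz, hzL, if_true]
      exact ih seen
    · have hz' : seen z = false := by simpa using hz
      by_cases hzx : z = x
      · subst hzx
        have hzL : (seen z || (z == z)) = true := by simp
        have hidem : (fun y => (seen y || (y == z)) || (y == z)) = (fun y => seen y || (y == z)) :=
          funext (fun y => by rcases Bool.eq_false_or_eq_true (y == z) with h | h <;> simp [h])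
        have hfix : mdd pred (fun y => seen y || (y == z)) t
            = (mdd pred (fun y => seen y || (y == z)) t).filter (fun y => !(y == z)) := by
          conv_lhs => rw [← hidem]
          exact ih (fun y => seen y || (y == z))
        by_cases hp : pred z = true
        · simp only [mdd, hzL, if_true, hz', Bool.false_eq_true, if_false, hp,
            List.filter_cons, BEq.rfl, Bool.not_true]
          exact hfix
        · have hp' : pred z = false := by simpa using hp
          simp only [mdd, hzL, if_true, hz', Bool.false_eq_true, if_false, hp',
            Bool.false_or, BEq.rfl]
          exact hfix
      · have hzx' : (z == x) = false := by simp [hzx]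
        have hL : (seen z || (z == x)) = false := by simp [hz', hzx']
        have comm : (fun y => seen y || y == x || y == z) = (fun y => seen y || y == z || y == x) :=
          funext (fun y => by rcases Bool.eq_false_or_eq_true (seen y) with h | h <;>
            rcases Bool.eq_false_or_eq_true (y == x) with h2 | h2 <;> simp [h, h2])
        by_cases hp : pred z = true
        · simp only [mdd, hL, Bool.false_eq_true, if_false, hp, if_true, hz',
            List.filter_cons, hzx', Bool.not_false]
          rw [comm]
          exact congrArg (z :: ·) (ih (fun y => seen y || (y == z)))
        · have hp' : pred z = false := by simpa using hp
          simp only [mdd, hL, Bool.false_eq_true, if_false, hp', hz', Bool.false_or, hzx']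
          rw [comm]
          exact ih (fun y => seen y || (y == z))

-- every element of the result satisfies pred and was unseen
theorem mem_mdd (pred : Int → Bool) (y : Int) (l : List Int) :
    ∀ seen : Int → Bool, y ∈ mdd pred seen l → pred y = true ∧ seen y = false := by
  induction l with
  | nil => intro seen h; simp [mdd] at h
  | cons z t ih =>
    intro seen h
    by_cases hz : seen z = true
    · simp only [mdd, hz, if_true] at h
      exact ih seen h
    · have hz' : seen z = false := by simpa using hz
      by_cases hp : pred z = true
      · simp only [mdd, hz', Bool.false_eq_true, if_false, hp, if_true, List.mem_cons] at h
        rcases h with rfl | h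
        · exact ⟨hp, hz'⟩
        · have := ih _ h
          exact ⟨this.1, by simpa using (Bool.or_eq_false_iff.mp this.2).1⟩
      · have hp' : pred z = false := by simpa using hp
        simp only [mdd, hz', Bool.false_eq_true, if_false, hp'] at h
        have := ih _ h
        exact ⟨this.1, by simpa using (Bool.or_eq_false_iff.mp this.2).1⟩

-- every unseen element of l with pred appears in the result
theorem mem_mdd_of (pred : Int → Bool) (y : Int) (l : List Int) :
    ∀ seen : Int → Bool, y ∈ l → seen y = false → pred y = true → y ∈ mdd pred seen l := by
  induction l with
  | nil => intro seen h; simp at h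
  | cons z t ih =>
    intro seen hmem hseen hpred
    rcases List.mem_cons.mp hmem with rfl | hmem'
    · simp [mdd, hseen, hpred]
    · by_cases hz : seen z = true
      · simp only [mdd, hz, if_true]
        exact ih seen hmem' hseen hpred
      · have hz' : seen z = false := by simpa using hz
        by_cases hyz : y = z
        · subst hyz
          simp [mdd, hz', hpred]
        · have hseen' : (seen y || (y == z)) = false := by simp [hseen, hyz]
          by_cases hp : pred z = true
          · simp only [mdd, hz', Bool.false_eq_true, if_false, hp, if_true, List.mem_cons]
            exact Or.inr (ih _ hmem' hseen' hpred)
          · have hp' : pred z = false := by simpa using hp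
            simp only [mdd, hz', Bool.false_eq_true, if_false, hp']
            exact ih _ hmem' hseen' hpred

-- the result has no duplicates
theorem nodup_mdd (pred : Int → Bool) (l : List Int) :
    ∀ seen : Int → Bool, (mdd pred seen l).Nodup := by
  induction l with
  | nil => intro seen; simp [mdd]
  | cons z t ih =>
    intro seen
    by_cases hz : seen z = true
    · simp only [mdd, hz, if_true]; exact ih seen
    · have hz' : seen z = false := by simpa using hz
      by_cases hp : pred z = true
      · simp only [mdd, hz', Bool.false_eq_true, if_false, hp, if_true, List.nodup_cons]
        refine ⟨fun hmem => ?_, ih _⟩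
        have := (mem_mdd pred z t _ hmem).2
        simp at this
      · have hp' : pred z = false := by simpa using hp
        simp only [mdd, hz', Bool.false_eq_true, if_false, hp']
        exact ih _

-- ---- bridging B's port to mdd ----

theorem contains_add (s : PySem.Set Int) (x y : Int) :
    PySem.Set.contains (PySem.Set.add s x) y = (PySem.Set.contains s y || (y == x)) := by
  by_cases hy : y ∈ s <;> by_cases hx : x ∈ s
  · simp [PySem.Set.add_eq_ite, PySem.Set.contains, hx, hy]
  · simp [PySem.Set.add_eq_ite, PySem.Set.contains, hx, hy]
  · simp [PySem.Set.add_eq_ite, PySem.Set.contains, hx, hy]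
    rintro rfl; exact hy hx
  · simp [PySem.Set.add_eq_ite, PySem.Set.contains, hx, hy]
    by_cases h : y = x <;> simp [h]

-- B's second fold computes mdd (out only grows on the right; seen is read through contains)
theorem scan_eq_mdd (pred : Int → Bool) (l : List Int) :
    ∀ (s : PySem.Set Int) (o : List Int),
    (l.foldl
      (fun (st : PySem.Set Int × List Int) x =>
        if PySem.Set.contains st.1 x then st
        else (PySem.Set.add st.1 x, if pred x then st.2 ++ [x] else st.2))
      (s, o)).2
      = o ++ mdd pred (fun y => PySem.Set.contains s y) l := by
  induction l with
  | nil => intro s o; simp [mdd]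
  | cons x t ih =>
    intro s o
    by_cases hc : PySem.Set.contains s x = true
    · simp only [List.foldl_cons, hc, if_true, mdd]
      exact ih s o
    · have hc' : PySem.Set.contains s x = false := by simpa using hc
      have hseen : ∀ y, PySem.Set.contains (PySem.Set.add s x) y
          = ((fun y => PySem.Set.contains s y) y || (y == x)) := fun y => contains_add s x y
      by_cases hp : pred x = true
      · simp only [List.foldl_cons, hc', Bool.false_eq_true, if_false, hp, if_true, mdd]
        rw [ih (PySem.Set.add s x) (o ++ [x]),
            mdd_seen_congr pred _ _ hseen t]
        simp
      · have hp' : pred x = false := by simpa using hp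
        simp only [List.foldl_cons, hc', Bool.false_eq_true, if_false, hp', mdd]
        rw [ih (PySem.Set.add s x) o, mdd_seen_congr pred _ _ hseen t]

theorem modtwo (n : Nat) : (PySem.Int.mod (n : Int) 2 == 1) = (n % 2 == 1) := by
  rcases Nat.mod_two_eq_zero_or_one n with h | h <;>
  · have hc : (n : Int) % 2 = (n % 2 : Nat) := by push_cast; omega
    simp [PySem.Int.mod, Int.fmod_eq_emod, hc, h]

-- B's result in closed form
theorem alt_eq_mdd (p : List Int) :
    tusk_1_alt p = (mdd (fun y => p.count y % 2 == 1) (fun _ => false) p.reverse).reverse := by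
  unfold tusk_1_alt
  have hcnt : ∀ x : Int,
      ((p.foldl (fun d x => d.insert x (d.getD x 0 + 1)) PySem.Dict.empty).getD x 0)
        = (p.count x : Int) := by
    intro x
    rw [PySem.Dict.foldl_insert_getD_add_one_eq_counter, PySem.Dict.getD_counter]
  have hpred : (fun x => PySem.Int.mod
      ((p.foldl (fun d x => d.insert x (d.getD x 0 + 1)) PySem.Dict.empty).getD x 0) 2 == 1)
      = (fun y => p.count y % 2 == 1) := by
    funext x
    rw [hcnt x, modtwo]
  simp only [scan_eq_mdd, List.nil_append]
  rw [show (fun y => PySem.Set.contains PySem.Set.empty y) = (fun _ : Int => false) from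
    funext (fun y => by simp [PySem.Set.contains, PySem.Set.empty])]
  rw [show (fun x => (PySem.Int.mod
      ((p.foldl (fun d x => d.insert x (d.getD x 0 + 1)) PySem.Dict.empty).getD x 0) 2 == 1))
      = (fun y => p.count y % 2 == 1) from hpred]

-- ---- bridging A's port to a pure toggle fold ----

def stepA (s : List Int) (x : Int) : List Int :=
  if x ∉ s then s ++ [x]
  else
    match PySem.List.index? s x with
    | some izgoi => ((PySem.List.pop? s (izgoi : Int)).map Prod.snd).getD s
    | none => s

-- the izgoii component never influences second_list
theorem fst_fold (ml : List Int) (l : List Int) :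
    ∀ (s : List Int) (iz : List (List Int)),
    (l.foldl
      (fun (st : List Int × List (List Int)) x =>
        if x ∉ st.1 then (st.1 ++ [x], st.2)
        else match PySem.List.index? st.1 x with
          | some izgoi => (((PySem.List.pop? st.1 (izgoi : Int)).map Prod.snd).getD st.1, st.2 ++ [ml])
          | none => (st.1, st.2)) (s, iz)).1
      = l.foldl stepA s := by
  induction l with
  | nil => intro s iz; rfl
  | cons x t ih =>
    intro s iz
    simp only [List.foldl_cons]
    by_cases hx : x ∈ s
    · have : ¬ x ∉ s := not_not_intro hx
      rcases h : PySem.List.index? s x with _ | i <;>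
        simp only [stepA, this, if_false, h, ih]
    · simp only [stepA, hx, not_false_iff, if_true, ih]

theorem eraseIdx_append_cons (pre suf : List Int) (x : Int) :
    (pre ++ x :: suf).eraseIdx pre.length = pre ++ suf := by
  induction pre with
  | nil => simp
  | cons a t ih => simp [ih]

-- toggling an element already present, on a Nodup list, filters it out
theorem stepA_mem (s : List Int) (x : Int) (hnd : s.Nodup) (hx : x ∈ s) :
    stepA s x = s.filter (fun y => !(y == x)) := by
  obtain ⟨i, hi⟩ := Option.isSome_iff_exists.mp ((PySem.List.index?_isSome_iff s x).mpr hx)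
  obtain ⟨pre, suf, hs, hlen, hxpre⟩ := (PySem.List.index?_eq_some_iff s x i).mp hi
  subst hs; subst hlen
  have hxsuf : x ∉ suf := (List.nodup_cons.mp (List.nodup_append.mp hnd).2.1).1
  have hpop := PySem.List.pop?_natCast (pre ++ x :: suf) pre.length (by simp)
  have h1 : pre.filter (fun k => !(k == x)) = pre :=
    List.filter_eq_self.mpr (fun a ha => by
      simp only [Bool.not_eq_eq_eq_not, Bool.not_true, beq_eq_false_iff_ne]
      rintro rfl; exact hxpre ha)
  have h2 : suf.filter (fun k => !(k == x)) = suf :=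
    List.filter_eq_self.mpr (fun a ha => by
      simp only [Bool.not_eq_eq_eq_not, Bool.not_true, beq_eq_false_iff_ne]
      rintro rfl; exact hxsuf ha)
  rw [stepA, if_neg (not_not_intro hx), hi]
  simp only [hpop, Option.map_some, Option.getD_some]
  rw [eraseIdx_append_cons]
  simp [List.filter_append, h1, h2]

theorem stepA_not_mem (s : List Int) (x : Int) (hx : x ∉ s) :
    stepA s x = s ++ [x] := by
  simp [stepA, hx]

-- parity of the count flips when one occurrence is appended
theorem count_flip (n : Nat) : ((n + 1) % 2 == 1) = !(n % 2 == 1) := by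
  rcases Nat.mod_two_eq_zero_or_one n with h | h <;> simp [Nat.add_mod, h]

-- ---- the main induction: A's toggle fold = B's closed form, by snoc induction ----

theorem toggle_eq_mdd (p : List Int) :
    p.foldl stepA []
      = (mdd (fun y => p.count y % 2 == 1) (fun _ => false) p.reverse).reverse := by
  induction p using List.reverseRecOn with
  | nil => rfl
  | append_singleton p x ih =>
    have hpred' : ∀ y, y ≠ x → ((p ++ [x]).count y % 2 == 1) = (p.count y % 2 == 1) := by
      intro y hy
      simp [List.count_append, List.count_singleton, Ne.symm hy]
    have hpredx : ((p ++ [x]).count x % 2 == 1) = !(p.count x % 2 == 1) := by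
      have hc : (p ++ [x]).count x = p.count x + 1 := by simp [List.count_append]
      rw [hc]; exact count_flip (p.count x)
    set pred := fun y => p.count y % 2 == 1 with hpreddef
    set D := mdd pred (fun _ : Int => false) p.reverse with hD
    have hrev : (p ++ [x]).reverse = x :: p.reverse := by simp
    -- the tail of B's scan: unseen-congruence then seen-x-filter
    have htail : mdd (fun y => (p ++ [x]).count y % 2 == 1) (fun y => false || (y == x)) p.reverse
        = D.filter (fun y => !(y == x)) := by
      rw [mdd_pred_congr _ pred p.reverse _ (fun y hy => by
        have : y ≠ x := by simpa using (Bool.or_eq_false_iff.mp hy).2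
        exact hpred' y this)]
      rw [show (fun y : Int => false || (y == x)) = (fun y => (fun _ : Int => false) y || (y == x)) from rfl]
      exact mdd_add_filter pred x p.reverse (fun _ => false)
    have hmddcons : mdd (fun y => (p ++ [x]).count y % 2 == 1) (fun _ : Int => false) (x :: p.reverse)
        = if (p ++ [x]).count x % 2 == 1
          then x :: (D.filter (fun y => !(y == x)))
          else D.filter (fun y => !(y == x)) := by
      by_cases hp : ((p ++ [x]).count x % 2 == 1) = true
      · simp only [mdd, Bool.false_eq_true, if_false, hp, if_true, htail]
      · have hp' : ((p ++ [x]).count x % 2 == 1) = false := by simpa using hp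
        simp only [mdd, Bool.false_eq_true, if_false, hp', htail]
    rw [List.foldl_append, List.foldl_cons, List.foldl_nil, ih, hrev, hmddcons]
    by_cases hx : pred x = true
    · -- x had odd count in p: A removes it, B's new parity is even
      have hxD : x ∈ D := by
        apply mem_mdd_of
        · have : x ∈ p := List.count_pos_iff.mp (by
            rcases Nat.mod_two_eq_zero_or_one (p.count x) with h | h
            · exfalso; rw [hpreddef] at hx; simp [h] at hx
            · omega)
          simpa using this
        · rfl
        · exact hx
      have hxrev : x ∈ D.reverse := by simpa using hxD
      have hnd : D.reverse.Nodup :=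
        List.nodup_reverse.mpr (nodup_mdd pred p.reverse (fun _ => false))
      have hxraw : (p.count x % 2 == 1) = true := hx
      have hparity : ((p ++ [x]).count x % 2 == 1) = false := by
        rw [hpredx, hxraw]; rfl
      rw [stepA_mem D.reverse x hnd hxrev, hparity]
      simp only [Bool.false_eq_true, if_false]
      rw [← List.filter_reverse]
    · -- x had even count in p: A appends it, B's new parity is odd
      have hx' : pred x = false := by simpa using hx
      have hxD : x ∉ D := fun hm => by
        have := (mem_mdd pred x p.reverse _ hm).1
        rw [hx'] at this; exact Bool.false_ne_true this
      have hxrev : x ∉ D.reverse := fun hm => hxD (by simpa using hm)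
      have hxraw : (p.count x % 2 == 1) = false := hx'
      have hparity : ((p ++ [x]).count x % 2 == 1) = true := by
        rw [hpredx, hxraw]; rfl
      have hfilt : D.filter (fun y => !(y == x)) = D :=
        List.filter_eq_self.mpr (fun a ha => by
          simp only [Bool.not_eq_eq_eq_not, Bool.not_true, beq_eq_false_iff_ne]
          rintro rfl; exact hxD ha)
      rw [stepA_not_mem D.reverse x hxrev, hparity]
      simp [hfilt]

-- ===== VERDICT (by name: the statement is the Claim_ definition above) =====
theorem tusk_1_spec : Claim_equal_tusk_1 := by
  intro main_list _
  unfold Spec_tusk_1 tusk_1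
  rw [fst_fold main_list main_list [] [], toggle_eq_mdd, ← alt_eq_mdd]
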